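-- pv_equiv track=rewrite | github.com/benquick123/code-profiling | code/izpiti/izpit01a/M-17048-1271.py | roboti
-- ===== SOURCE A (Python) =====
-- def roboti(navodila, n):
--     robots = []
--     for i in range(0, n):
--         robots.append([0, 0])
--
--     robot_index = 0
--     for instruction in navodila:
--         if instruction == "S":
--             robots[robot_index][1] += 1
--         elif instruction == "V":
--             robots[robot_index][0] += 1
--         elif instruction == "J":
--             robots[robot_index][1] -= 1
--         elif instruction == "Z":
--             robots[robot_index][0] -= 1
--
--         robot_index = (robot_index + 1) % len(robots)
--
--     for i in range(0, len(robots)):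
--         robots[i] = (robots[i][0], robots[i][1])
--
--     return robots
-- ===== SOURCE B (Python) =====
-- def roboti(navodila, n):
--     # Per-robot decomposition: robot i receives exactly the strided slice
--     # navodila[i::n]; tally its moves directly, no shared mutable state.
--     result = []
--     for i in range(n):
--         x, y = 0, 0
--         for c in navodila[i::n]:
--             if c == "V":
--                 x += 1
--             elif c == "Z":
--                 x -= 1
--             elif c == "S":
--                 y += 1
--             elif c == "J":
--                 y -= 1
--         result.append((x, y))
--     return result
-- ===== Notes on version B (the rewrite author's own statement) =====
-- stated objective: alternative
-- what changed: B decomposes per robot: robot i's instructions are exactly the strided slice navodila[i::n], tallied independently with a pure (x,y) accumulator, replacing A's single interleaved pass over a shared mutable robot array with a round-robin index maintained by modulo.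
-- crash fix: When n <= 0 and navodila is non-empty, A raises IndexError or ZeroDivisionError (robots is empty); B returns []. — e.g. on roboti("S", 0): A raises IndexError, B returns []
import Mathlib
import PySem

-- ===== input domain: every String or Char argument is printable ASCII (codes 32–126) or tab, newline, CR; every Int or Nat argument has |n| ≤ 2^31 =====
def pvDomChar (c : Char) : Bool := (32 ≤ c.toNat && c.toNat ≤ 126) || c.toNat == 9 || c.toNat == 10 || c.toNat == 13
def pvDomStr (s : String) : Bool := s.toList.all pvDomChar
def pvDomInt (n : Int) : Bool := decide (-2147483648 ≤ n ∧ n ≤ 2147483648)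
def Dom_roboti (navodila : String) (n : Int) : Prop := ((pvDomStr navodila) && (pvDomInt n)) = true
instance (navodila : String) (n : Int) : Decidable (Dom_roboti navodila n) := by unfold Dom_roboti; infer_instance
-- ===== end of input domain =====

-- B replaces A's interleaved pass over a mutable robot array (round-robin index mod n)
-- by independent per-robot tallies over the strided slices navodila[i::n]; return values
-- agree on Pre_ (A mutates only its own local list, so no observable side effects).

-- ===== PORT A =====
-- One step of A's instruction loop: update robots[robot_index] by the branch chain,
-- then robot_index = (robot_index + 1) % len(robots).  robot_index is a Python int;
-- under Pre_ it is provably in [0, len(robots)), so .toNat/List.set/List.getD here is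
-- exact (outside Pre_ the Python raises and nothing is claimed).
def robotiStep (st : List (Int × Int) × Int) (c : Char) : List (Int × Int) × Int :=
  let robots :=
    if c = 'S' then st.1.set st.2.toNat ((st.1.getD st.2.toNat (0, 0)).1, (st.1.getD st.2.toNat (0, 0)).2 + 1)
    else if c = 'V' then st.1.set st.2.toNat ((st.1.getD st.2.toNat (0, 0)).1 + 1, (st.1.getD st.2.toNat (0, 0)).2)
    else if c = 'J' then st.1.set st.2.toNat ((st.1.getD st.2.toNat (0, 0)).1, (st.1.getD st.2.toNat (0, 0)).2 - 1)
    else if c = 'Z' then st.1.set st.2.toNat ((st.1.getD st.2.toNat (0, 0)).1 - 1, (st.1.getD st.2.toNat (0, 0)).2)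
    else st.1
  (robots, PySem.Int.mod (st.2 + 1) robots.length)

-- A: build n robots [0,0], run the instruction loop, then convert each [x,y] to (x,y)
-- (the final conversion loop is the identity under the pair representation used here).
def roboti (navodila : String) (n : Int) : List (Int × Int) :=
  let robots := (PySem.List.pyRange 0 n 1).map (fun _ => ((0 : Int), (0 : Int)))
  (navodila.toList.foldl robotiStep (robots, 0)).1

-- ===== PORT B =====
-- B's inner loop: tally one instruction character into the (x, y) accumulator.
def robotiTally (p : Int × Int) (c : Char) : Int × Int :=
  if c = 'V' then (p.1 + 1, p.2)
  else if c = 'Z' then (p.1 - 1, p.2)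
  else if c = 'S' then (p.1, p.2 + 1)
  else if c = 'J' then (p.1, p.2 - 1)
  else p

-- B: for i in range(n), fold the tally over the slice navodila[i::n].
-- (slice? never returns none here since the step n is nonzero inside the loop; .getD "" is a totality guard only.)
def roboti_alt (navodila : String) (n : Int) : List (Int × Int) :=
  (PySem.List.pyRange 0 n 1).map (fun i =>
    ((PySem.Str.slice? navodila (some i) none n).getD "").toList.foldl robotiTally (0, 0))

-- ===== PRECONDITION & SPEC =====
-- A raises (IndexError or ZeroDivisionError: robots is empty) iff n ≤ 0 and navodila ≠ "".
def Pre_roboti (navodila : String) (n : Int) : Prop := 1 ≤ n ∨ navodila = ""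
instance (navodila : String) (n : Int) : Decidable (Pre_roboti navodila n) := by unfold Pre_roboti; infer_instance
def pvWitness_roboti : String × Int := ("SVJZSx", 2)

-- When n ≤ 0 and navodila is non-empty, A raises (IndexError or ZeroDivisionError); B returns [].
def Raises_roboti (navodila : String) (n : Int) : Prop := n ≤ 0 ∧ navodila ≠ ""
instance (navodila : String) (n : Int) : Decidable (Raises_roboti navodila n) := by unfold Raises_roboti; infer_instance
def pvRaiseWitness_roboti : String × Int := ("S", 0)
def pvRaiseWitnessOut_roboti : List (Int × Int) := []

def Spec_roboti (navodila : String) (n : Int) (out : List (Int × Int)) : Prop := out = roboti_alt navodila n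
instance (navodila : String) (n : Int) (out : List (Int × Int)) : Decidable (Spec_roboti navodila n out) := by unfold Spec_roboti; infer_instance

-- ===== CLAIM (what is proved, stated in full; the proofs are below) =====
def Claim_equal_roboti : Prop := ∀ (navodila : String) (n : Int), Dom_roboti navodila n → Pre_roboti navodila n → Spec_roboti navodila n (roboti navodila n)
def Claim_raises_roboti : Prop := (∀ (navodila : String) (n : Int), Dom_roboti navodila n → Raises_roboti navodila n → ¬ Pre_roboti navodila n) ∧ (Dom_roboti (pvRaiseWitness_roboti.1) (pvRaiseWitness_roboti.2) ∧ Raises_roboti (pvRaiseWitness_roboti.1) (pvRaiseWitness_roboti.2) ∧ roboti_alt (pvRaiseWitness_roboti.1) (pvRaiseWitness_roboti.2) = pvRaiseWitnessOut_roboti)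

-- ===== LEMMAS AND PROOFS =====

def everyN (l : List Char) (N : Nat) : List Char :=
  match l with
  | [] => []
  | c :: t => c :: everyN (t.drop (N - 1)) N
termination_by l.length
decreasing_by simp
theorem everyN_nil (N : Nat) : everyN [] N = [] := by rw [everyN.eq_def]
theorem everyN_cons (c : Char) (t : List Char) (N : Nat) :
    everyN (c :: t) N = c :: everyN (t.drop (N - 1)) N := by rw [everyN.eq_def]

theorem stride_filterMap (N : Nat) (hN : 1 ≤ N) :
    ∀ (ds : List Char),
      (List.range ((ds.length + N - 1) / N)).filterMap (fun k => ds[N * k]?) = everyN ds N := by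
  intro ds
  induction hL : ds.length using Nat.strong_induction_on generalizing ds with
  | _ L ih =>
  cases ds with
  | nil =>
    subst hL
    rw [everyN_nil]
    simp
  | cons c t =>
    subst hL
    rw [everyN_cons]
    have hcount : ((c :: t).length + N - 1) / N = ((t.drop (N - 1)).length + N - 1) / N + 1 := by
      simp only [List.length_cons, List.length_drop]
      have h1 : t.length + 1 + N - 1 = t.length + N := by omega
      rw [h1, Nat.add_div_right _ (by omega : 0 < N)]
      by_cases hc : N - 1 ≤ t.length
      · have h2 : t.length - (N - 1) + N - 1 = t.length := by omega
        rw [h2]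
      · have h2 : t.length - (N - 1) = 0 := by omega
        rw [h2, Nat.div_eq_of_lt (by omega), Nat.div_eq_of_lt (by omega)]
    rw [hcount, List.range_succ_eq_map, List.filterMap_cons, List.filterMap_map]
    simp only [Nat.mul_zero, List.getElem?_cons_zero]
    have hfun : ∀ k : Nat, ((fun k => (c :: t)[N * k]?) ∘ Nat.succ) k = (t.drop (N - 1))[N * k]? := by
      intro k
      simp only [Function.comp_apply]
      have h3 : N * Nat.succ k = (N - 1 + N * k) + 1 := by rw [Nat.succ_eq_add_one, Nat.mul_add]; omega
      rw [h3, List.getElem?_cons_succ, List.getElem?_drop]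
    rw [List.filterMap_congr (fun a _ => hfun a),
       ih (t.drop (N - 1)).length (by simp only [List.length_drop, List.length_cons]; omega) _ rfl]

theorem slice?_stride (s : String) (i n : Int) (hi : 0 ≤ i) (hn : 0 < n) :
    PySem.Str.slice? s (some i) none n
      = some (String.ofList (everyN (s.toList.drop i.toNat) n.toNat)) := by
  rw [PySem.Str.slice?]
  rw [PySem.Chars.slice?_eq_listSlice?]
  rw [PySem.List.slice?]
  simp only [if_neg (by omega : ¬ n = 0)]
  rw [PySem.List.sliceIndices]
  simp only [if_neg (by omega : ¬ n < 0)]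
  simp only [if_neg (by omega : ¬ i < 0)]
  obtain ⟨S, rfl⟩ : ∃ S : Nat, i = ↑S := ⟨i.toNat, (Int.toNat_of_nonneg hi).symm⟩
  obtain ⟨N, rfl⟩ : ∃ N : Nat, n = ↑N := ⟨n.toNat, (Int.toNat_of_nonneg hn.le).symm⟩
  have hN : 1 ≤ N := by omega
  simp only [if_pos hn, Int.toNat_natCast]
  by_cases hSL : S < s.toList.length
  · rw [show (min (↑S : Int) ↑s.toList.length) = ↑S from by omega]
    rw [if_pos (by omega : (↑S : Int) < ↑s.toList.length)]
    rw [show ((↑s.toList.length - ↑S + ↑N - 1 : Int)) = ↑(s.toList.length - S + N - 1) from by omega]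
    rw [show ((↑(s.toList.length - S + N - 1) : Int) / ↑N) = ↑((s.toList.length - S + N - 1) / N) from (Int.natCast_div _ _).symm]
    rw [Int.toNat_natCast]
    have hfun : ∀ k ∈ List.range ((s.toList.length - S + N - 1) / N),
        s.toList[((↑S : Int) + ↑N * ↑k).toNat]? = (s.toList.drop S)[N * k]? := by
      intro k _
      rw [show ((↑S : Int) + ↑N * ↑k).toNat = S + N * k from by
            rw [show ((↑S : Int) + ↑N * ↑k) = ↑(S + N * k) from by push_cast; ring]
            exact Int.toNat_natCast _,
          List.getElem?_drop]
    rw [List.filterMap_congr hfun]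
    rw [show s.toList.length - S + N - 1 = (s.toList.drop S).length + N - 1 from by simp]
    rw [stride_filterMap N hN (s.toList.drop S)]
    simp
  · rw [show (min (↑S : Int) ↑s.toList.length) = ↑s.toList.length from by omega]
    rw [if_neg (by omega : ¬ ((↑s.toList.length : Int) < ↑s.toList.length))]
    rw [List.drop_eq_nil_of_le (by omega : s.toList.length ≤ S), everyN_nil]
    simp

theorem robotiStep_eq (robots : List (Int × Int)) (k N : Nat) (c : Char)
    (hlen : robots.length = N) (hk : k < N) :
    robotiStep (robots, (k : Int)) c
      = (robots.set k (robotiTally (robots.getD k (0, 0)) c), (((k + 1) % N : Nat) : Int)) := by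
  have hmod : PySem.Int.mod ((k : Int) + 1) (N : Int) = (((k + 1) % N : Nat) : Int) := by
    rw [PySem.Int.mod, Int.fmod_eq_emod]
    rw [if_pos (Or.inl (by positivity : (0:Int) ≤ (N : Int)))]
    push_cast [Int.natCast_mod]
    ring
  have hset : ∀ v, (robots.set k v).length = N := by simp [hlen]
  simp only [robotiStep, robotiTally, Int.toNat_natCast]
  split_ifs with h1 h2 h3 h4 <;>
    simp_all [List.set_getElem_self, List.getD_eq_getElem?_getD]

theorem foldA_get (cs : List Char) :
    ∀ (robots : List (Int × Int)) (k N : Nat), robots.length = N → k < N →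
    ∀ i, i < N →
      ((cs.foldl robotiStep (robots, (k : Int))).1).getD i (0, 0)
        = (everyN (cs.drop ((i + N - k) % N)) N).foldl robotiTally (robots.getD i (0, 0)) := by
  induction cs with
  | nil => intro robots k N hlen hk i hi; simp [everyN_nil]
  | cons c cs ih =>
    intro robots k N hlen hk i hi
    have key : ∀ a b : Nat, a < N → b < N →
        (a + N - b) % N = if b ≤ a then a - b else a + N - b := by
      intro a b ha hb
      by_cases h : b ≤ a
      · rw [if_pos h, show a + N - b = (a - b) + N from by omega,
            Nat.add_mod_right, Nat.mod_eq_of_lt (by omega)]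
      · rw [if_neg h, Nat.mod_eq_of_lt (by omega)]
    have hsucc : (k + 1) % N = if k + 1 = N then 0 else k + 1 := by
      by_cases h : k + 1 = N
      · rw [if_pos h, h, Nat.mod_self]
      · rw [if_neg h, Nat.mod_eq_of_lt (by omega)]
    have hsucc_lt : (k + 1) % N < N := by rw [hsucc]; split_ifs <;> omega
    rw [List.foldl_cons, robotiStep_eq robots k N c hlen hk]
    rw [ih (robots.set k (robotiTally (robots.getD k (0, 0)) c)) ((k + 1) % N) N
        (by simp [hlen]) hsucc_lt i hi]
    by_cases hik : i = k
    · subst hik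
      rw [show (i + N - i) % N = 0 from by rw [key i i hi hi]; simp]
      rw [show (i + N - (i + 1) % N) % N = N - 1 from by
            rw [hsucc]
            split_ifs with h
            · rw [show i + N - 0 = (i - 0) + N from by omega, Nat.add_mod_right,
                  Nat.mod_eq_of_lt (by omega)]
              omega
            · rw [key i (i + 1) hi (by omega)]
              split_ifs <;> omega]
      rw [List.drop_zero, everyN_cons, List.foldl_cons]
      congr 1
      rw [List.getD_eq_getElem?_getD, List.getElem?_set_self (by omega), Option.getD_some]
    · have hoff0 : (i + N - k) % N ≠ 0 := by rw [key i k hi hk]; split_ifs <;> omega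
      obtain ⟨m, hm⟩ : ∃ m, (i + N - k) % N = m + 1 := ⟨(i + N - k) % N - 1, by omega⟩
      rw [hm, List.drop_succ_cons]
      rw [show (i + N - (k + 1) % N) % N = m from by
            rw [key i k hi hk] at hm
            rw [hsucc]
            split_ifs at hm ⊢ with h1 h2 h2
            · rw [show i + N - 0 = (i - 0) + N from by omega, Nat.add_mod_right,
                  Nat.mod_eq_of_lt (by omega)]
              omega
            · rw [show i + N - 0 = (i - 0) + N from by omega, Nat.add_mod_right,
                  Nat.mod_eq_of_lt (by omega)]
              omega
            · rw [key i (k + 1) hi (by omega)]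
              split_ifs <;> omega
            · rw [key i (k + 1) hi (by omega)]
              split_ifs <;> omega]
      congr 1
      rw [List.getD_eq_getElem?_getD, List.getElem?_set_ne (by omega)]
      rfl

theorem foldA_length (cs : List Char) (st : List (Int × Int) × Int) :
    (cs.foldl robotiStep st).1.length = st.1.length := by
  induction cs generalizing st with
  | nil => rfl
  | cons c cs ih =>
    simp only [List.foldl_cons, ih]
    simp [robotiStep]
    split_ifs <;> simp

theorem roboti_eq_pos (navodila : String) (n : Int) (hn : 1 ≤ n) :
    roboti navodila n = roboti_alt navodila n := by
  obtain ⟨N, rfl⟩ : ∃ N : Nat, n = ↑N := ⟨n.toNat, (Int.toNat_of_nonneg (by omega)).symm⟩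
  have hN : 1 ≤ N := by omega
  have hlen0 : ((PySem.List.pyRange 0 (N : Int) 1).map (fun _ => ((0 : Int), (0 : Int)))).length = N := by
    simp [PySem.List.length_pyRange_one]
  have hlenA : (roboti navodila (N : Int)).length = N := by
    rw [roboti, foldA_length]; exact hlen0
  have hlenB : (roboti_alt navodila (N : Int)).length = N := by
    rw [roboti_alt, List.length_map, PySem.List.length_pyRange_one]; simp
  apply List.ext_getElem?
  intro i
  by_cases hi : i < N
  · rw [List.getElem?_eq_getElem (by omega : i < (roboti navodila (N:Int)).length),
        List.getElem?_eq_getElem (by omega : i < (roboti_alt navodila (N:Int)).length)]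
    congr 1
    rw [← List.getD_eq_getElem (roboti navodila (N:Int)) (0,0) (by omega),
        ← List.getD_eq_getElem (roboti_alt navodila (N:Int)) (0,0) (by omega)]
    rw [roboti]
    have h := foldA_get navodila.toList ((PySem.List.pyRange 0 (N : Int) 1).map (fun _ => ((0 : Int), (0 : Int)))) 0 N hlen0 (by omega) i hi
    rw [show (i + N - 0) % N = i from by
          rw [show i + N - 0 = i + N from rfl, Nat.add_mod_right, Nat.mod_eq_of_lt hi]] at h
    simp only [Nat.cast_zero] at h
    have h0 : ((PySem.List.pyRange 0 (N : Int) 1).map (fun _ => ((0 : Int), (0 : Int)))).getD i (0, 0) = ((0 : Int), (0 : Int)) := by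
      rw [List.getD_eq_getElem?_getD, List.getElem?_map, PySem.List.getElem?_pyRange_one]
      simp [hi]
    rw [h0] at h
    rw [h]
    have hB : (roboti_alt navodila (N : Int)).getD i (0, 0)
        = ((PySem.Str.slice? navodila (some (i : Int)) none (N : Int)).getD "").toList.foldl robotiTally (0, 0) := by
      rw [roboti_alt, List.getD_eq_getElem?_getD, List.getElem?_map, PySem.List.getElem?_pyRange_one]
      simp [hi]
    rw [hB, slice?_stride navodila (i : Int) (N : Int) (by positivity) (by omega)]
    simp
  · rw [List.getElem?_eq_none (by omega), List.getElem?_eq_none (by omega)]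

-- ===== VERDICT (by name: the statement is the Claim_ definition above) =====
theorem roboti_spec : Claim_equal_roboti := by
  intro navodila n _ hpre
  unfold Spec_roboti
  by_cases hn : 1 ≤ n
  · exact roboti_eq_pos navodila n hn
  · rcases hpre with h | h
    · omega
    · subst h
      simp [roboti, roboti_alt, PySem.List.pyRange_one_eq_nil (by omega : n ≤ 0)]

@[simp] theorem roboti_raises : Claim_raises_roboti := by
  unfold Claim_raises_roboti
  constructor
  · intro s n _ ⟨h1, h2⟩ hpre
    rcases hpre with h | h
    · omega
    · exact h2 h
  · exact ⟨by decide, by decide, by decide⟩
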